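-- pv_equiv track=rewrite | github.com/kying321/trade_test | system/scripts/build_crypto_shortline_setup_transition_watch.py | ordered_missing_gates
-- ===== SOURCE A (Python) =====
-- TRIGGER_STAGE_DEFINITIONS = (
--     ("4h_profile_location", "profile_location", ("profile_location=", "cvd_key_level_context")),
--     ("liquidity_sweep", "liquidity_sweep", ("liquidity_sweep",)),
--     ("1m_5m_mss_or_choch", "mss", ("mss",)),
--     (
--         "15m_cvd_divergence_or_confirmation",
--         "cvd_confirmation",
--         ("cvd_local_window", "cvd_drift_guard", "cvd_attack_confirmation", "cvd_confirmation"),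
--     ),
--     ("fvg_ob_breaker_retest", "fvg_ob_breaker_retest", ("fvg_ob_breaker_retest",)),
--     (
--         "15m_reversal_or_breakout_candle",
--         "reversal_or_breakout_candle",
--         ("reversal_or_breakout_candle",),
--     ),
--     ("route_state", "route_state", ("route_state=",)),
-- )
--
-- def ordered_missing_gates(missing_gates: list[str], trigger_stack: list[str]) -> list[str]:
--     ordered: list[str] = []
--     seen: set[str] = set()
--     for trigger_gate in trigger_stack:
--         matched: list[str] = []
--         for alias, canonical, prefixes in TRIGGER_STAGE_DEFINITIONS:
--             if trigger_gate not in {alias, canonical}: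
--                 continue
--             matched = [
--                 gate
--                 for gate in missing_gates
--                 if any(gate.startswith(prefix) for prefix in prefixes)
--             ]
--             break
--         if not matched and trigger_gate in missing_gates:
--             matched = [trigger_gate]
--         for gate in matched:
--             if gate in seen:
--                 continue
--             ordered.append(gate)
--             seen.add(gate)
--     for gate in missing_gates:
--         if gate not in seen:
--             ordered.append(gate)
--             seen.add(gate)
--     return ordered
-- ===== SOURCE B (Python) =====
-- TRIGGER_STAGE_DEFINITIONS = (
--     ("4h_profile_location", "profile_location", ("profile_location=", "cvd_key_level_context")),
--     ("liquidity_sweep", "liquidity_sweep", ("liquidity_sweep",)),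
--     ("1m_5m_mss_or_choch", "mss", ("mss",)),
--     (
--         "15m_cvd_divergence_or_confirmation",
--         "cvd_confirmation",
--         ("cvd_local_window", "cvd_drift_guard", "cvd_attack_confirmation", "cvd_confirmation"),
--     ),
--     ("fvg_ob_breaker_retest", "fvg_ob_breaker_retest", ("fvg_ob_breaker_retest",)),
--     (
--         "15m_reversal_or_breakout_candle",
--         "reversal_or_breakout_candle",
--         ("reversal_or_breakout_candle",),
--     ),
--     ("route_state", "route_state", ("route_state=",)),
-- )
--
--
-- def _prefixes_for(trigger_gate):
--     for alias, canonical, prefixes in TRIGGER_STAGE_DEFINITIONS: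
--         if trigger_gate == alias or trigger_gate == canonical:
--             return prefixes
--     return None
--
--
-- def _selected(missing_gates, trigger_gate):
--     prefixes = _prefixes_for(trigger_gate)
--     matched = (
--         []
--         if prefixes is None
--         else [g for g in missing_gates if any(g.startswith(p) for p in prefixes)]
--     )
--     if not matched and trigger_gate in missing_gates:
--         matched = [trigger_gate]
--     return matched
--
--
-- def ordered_missing_gates(missing_gates: list[str], trigger_stack: list[str]) -> list[str]:
--     # Index each gate by the first trigger that selects it, then emit the
--     # deduplicated missing gates grouped by that priority (never-selected last).
--     n = len(trigger_stack)
--     prio: dict[str, int] = {}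
--     for i, trigger_gate in enumerate(trigger_stack):
--         for g in _selected(missing_gates, trigger_gate):
--             prio.setdefault(g, i)
--     buckets = [[] for _ in range(n + 1)]
--     for g in dict.fromkeys(missing_gates):
--         buckets[prio.get(g, n)].append(g)
--     return [g for b in buckets for g in b]
-- ===== Notes on version B (the rewrite author's own statement) =====
-- stated objective: alternative
-- what changed: Replaces A's incremental ordered/seen set accumulation (emit-as-you-scan per trigger plus a trailing remainder loop) with a two-phase index-then-group pass: first build a dict mapping each gate to the first trigger index that selects it, then emit the deduplicated missing gates bucketed by that priority, never-selected gates last.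
import Mathlib
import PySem

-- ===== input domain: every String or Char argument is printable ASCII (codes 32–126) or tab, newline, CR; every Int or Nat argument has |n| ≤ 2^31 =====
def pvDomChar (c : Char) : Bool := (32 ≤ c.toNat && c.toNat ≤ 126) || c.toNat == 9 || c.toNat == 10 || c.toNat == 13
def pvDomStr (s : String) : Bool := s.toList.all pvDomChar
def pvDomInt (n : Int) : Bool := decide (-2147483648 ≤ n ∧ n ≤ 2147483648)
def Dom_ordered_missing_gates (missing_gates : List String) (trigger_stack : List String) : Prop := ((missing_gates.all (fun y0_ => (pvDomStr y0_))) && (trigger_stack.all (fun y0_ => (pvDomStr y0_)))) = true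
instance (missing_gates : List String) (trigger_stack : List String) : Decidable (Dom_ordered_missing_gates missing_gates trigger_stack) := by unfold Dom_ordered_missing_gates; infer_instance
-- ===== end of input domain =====

-- B replaces A's incremental ordered/seen accumulation with a first-selecting-trigger
-- index plus a grouped emission by that priority (objective: alternative decomposition).

-- ===== PORT A =====
def TRIGGER_STAGE_DEFINITIONS : List (String × String × List String) := [
  ("4h_profile_location", "profile_location", ["profile_location=", "cvd_key_level_context"]),
  ("liquidity_sweep", "liquidity_sweep", ["liquidity_sweep"]),
  ("1m_5m_mss_or_choch", "mss", ["mss"]),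
  ("15m_cvd_divergence_or_confirmation", "cvd_confirmation",
    ["cvd_local_window", "cvd_drift_guard", "cvd_attack_confirmation", "cvd_confirmation"]),
  ("fvg_ob_breaker_retest", "fvg_ob_breaker_retest", ["fvg_ob_breaker_retest"]),
  ("15m_reversal_or_breakout_candle", "reversal_or_breakout_candle", ["reversal_or_breakout_candle"]),
  ("route_state", "route_state", ["route_state="])]

-- A's inner `for alias, canonical, prefixes in TRIGGER_STAGE_DEFINITIONS: ... break` loop
def pvMatchLoopA (missing_gates : List String) (trigger_gate : String) :
    List (String × String × List String) → List String
  | [] => []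
  | (alias_, canonical, prefixes) :: rest =>
    if !(trigger_gate == alias_ || trigger_gate == canonical) then
      pvMatchLoopA missing_gates trigger_gate rest
    else
      missing_gates.filter (fun gate => prefixes.any (fun pre => PySem.Str.startswith gate pre))

def ordered_missing_gates (missing_gates : List String) (trigger_stack : List String) : List String :=
  let st1 := trigger_stack.foldl
    (fun (st : List String × PySem.Set String) trigger_gate =>
      let matched0 := pvMatchLoopA missing_gates trigger_gate TRIGGER_STAGE_DEFINITIONS
      let matched := if matched0.isEmpty && missing_gates.contains trigger_gate then
          [trigger_gate] else matched0
      matched.foldl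
        (fun st gate =>
          if PySem.Set.contains st.2 gate then st
          else (st.1 ++ [gate], PySem.Set.add st.2 gate)) st)
    ([], PySem.Set.empty)
  let st2 := missing_gates.foldl
    (fun st gate =>
      if PySem.Set.contains st.2 gate then st
      else (st.1 ++ [gate], PySem.Set.add st.2 gate)) st1
  st2.1

-- ===== PORT B =====
-- B's `_prefixes_for` helper
def pvPrefixesFor (trigger_gate : String) :
    List (String × String × List String) → Option (List String)
  | [] => none
  | (alias_, canonical, prefixes) :: rest =>
    if trigger_gate == alias_ || trigger_gate == canonical then some prefixes
    else pvPrefixesFor trigger_gate rest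

-- B's `_selected` helper
def pvSelected (missing_gates : List String) (trigger_gate : String) : List String :=
  let matched := match pvPrefixesFor trigger_gate TRIGGER_STAGE_DEFINITIONS with
    | none => []
    | some prefixes =>
      missing_gates.filter (fun g => prefixes.any (fun p => PySem.Str.startswith g p))
  if matched.isEmpty && missing_gates.contains trigger_gate then [trigger_gate] else matched

def ordered_missing_gates_alt (missing_gates : List String) (trigger_stack : List String) :
    List String :=
  let n : Int := PySem.List.len trigger_stack
  let prio : PySem.Dict String Int := (PySem.List.enumerate trigger_stack).foldl
    (fun d it => (pvSelected missing_gates it.2).foldl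
      (fun d g => PySem.Dict.setdefault d g it.1) d)
    PySem.Dict.empty
  let buckets0 := (PySem.List.pyRange 0 (n + 1) 1).map (fun _ => ([] : List String))
  let buckets := (PySem.List.dedup missing_gates).foldl
    (fun bs g =>
      -- buckets[prio.get(g, n)].append(g); the index is always in [0, n], so .toNat is exact
      bs.modify (PySem.Dict.getD prio g n).toNat (fun b => b ++ [g])) buckets0
  buckets.foldl (fun acc b => b.foldl (fun acc g => acc ++ [g]) acc) []

-- ===== PRECONDITION & SPEC =====
def Spec_ordered_missing_gates (missing_gates : List String) (trigger_stack : List String) (out : List String) : Prop := out = ordered_missing_gates_alt missing_gates trigger_stack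
instance (missing_gates : List String) (trigger_stack : List String) (out : List String) : Decidable (Spec_ordered_missing_gates missing_gates trigger_stack out) := by unfold Spec_ordered_missing_gates; infer_instance

-- ===== CLAIM (what is proved, stated in full; the proofs are below) =====
def Claim_equal_ordered_missing_gates : Prop := ∀ (missing_gates : List String) (trigger_stack : List String), Dom_ordered_missing_gates missing_gates trigger_stack → Spec_ordered_missing_gates missing_gates trigger_stack (ordered_missing_gates missing_gates trigger_stack)

-- ===== LEMMAS AND PROOFS =====

-- the one-element dedup/emit step of A's two loops
def pvDStep (st : List String × PySem.Set String) (gate : String) :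
    List String × PySem.Set String :=
  if PySem.Set.contains st.2 gate then st
  else (st.1 ++ [gate], PySem.Set.add st.2 gate)

-- the remainder-peeling recursion both programs are shown equal to
def pvPeel (missing_gates : List String) (rem : List String) :
    List String → List String
  | [] => rem
  | t :: ts =>
    rem.filter (fun g => (pvSelected missing_gates t).contains g) ++
      pvPeel missing_gates (rem.filter (fun g => !(pvSelected missing_gates t).contains g)) ts

-- index of the first trigger whose selection contains g
def pvIdx (missing_gates : List String) (g : String) : List String → Option Nat
  | [] => none
  | t :: ts =>
    if (pvSelected missing_gates t).contains g then some 0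
    else (pvIdx missing_gates g ts).map (· + 1)

theorem pvMatchLoopA_eq (mg : List String) (t : String)
    (ds : List (String × String × List String)) :
    pvMatchLoopA mg t ds = (match pvPrefixesFor t ds with
      | none => []
      | some ps => mg.filter (fun g => ps.any (fun p => PySem.Str.startswith g p))) := by
  induction ds with
  | nil => rfl
  | cons d rest ih =>
    obtain ⟨a, c, ps⟩ := d
    by_cases h : (t == a || t == c) = true
    · simp [pvMatchLoopA, pvPrefixesFor, h]
    · simp [pvMatchLoopA, pvPrefixesFor, h, ih]

theorem pvMatchedA_eq (mg : List String) (t : String) :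
    (if (pvMatchLoopA mg t TRIGGER_STAGE_DEFINITIONS).isEmpty && mg.contains t then [t]
     else pvMatchLoopA mg t TRIGGER_STAGE_DEFINITIONS) = pvSelected mg t := by
  rw [pvMatchLoopA_eq]; rfl

theorem pvDFold (xs : List String) (o : List String) (s : PySem.Set String) :
    xs.foldl pvDStep (o, s) =
      (o ++ (PySem.Set.ofList xs).filter (fun g => !(PySem.Set.contains s g)),
       PySem.Set.update s xs) := by
  induction xs using List.reverseRecOn with
  | nil => simp [PySem.Set.ofList_nil, PySem.Set.update_nil]
  | append_singleton xs x ih =>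
    rw [List.foldl_append, ih]
    simp only [List.foldl_cons, List.foldl_nil]
    rw [PySem.Set.ofList_append_singleton, PySem.Set.update_append]
    by_cases hx : x ∈ PySem.Set.update s xs
    · have hc : PySem.Set.contains (PySem.Set.update s xs) x = true := by
        simpa [PySem.Set.contains_iff] using hx
      rw [pvDStep]
      simp only [hc, if_true]
      rw [PySem.Set.update_cons, PySem.Set.update_nil, PySem.Set.add_of_mem hx]
      rcases (PySem.Set.mem_update _ _ _).1 hx with hs | hxs
      · -- x ∈ s : add to ofList xs; filter drops x either way
        by_cases hm : x ∈ PySem.Set.ofList xs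
        · rw [PySem.Set.add_of_mem hm]
        · rw [PySem.Set.add_of_not_mem hm]
          simp [List.filter_append, PySem.Set.contains_iff, hs]
      · have hm : x ∈ PySem.Set.ofList xs := (PySem.Set.mem_ofList _ _).2 hxs
        rw [PySem.Set.add_of_mem hm]
    · have hc : PySem.Set.contains (PySem.Set.update s xs) x = false := by
        simp [PySem.Set.contains_iff, hx]
      have hs : x ∉ s := fun h => hx ((PySem.Set.mem_update _ _ _).2 (Or.inl h))
      have hxs : x ∉ xs := fun h => hx ((PySem.Set.mem_update _ _ _).2 (Or.inr h))
      have hm : x ∉ PySem.Set.ofList xs := fun h => hxs ((PySem.Set.mem_ofList _ _).1 h)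
      rw [pvDStep]
      simp only [hc, Bool.false_eq_true, if_false]
      rw [PySem.Set.add_of_not_mem hm, PySem.Set.update_cons, PySem.Set.update_nil,
        PySem.Set.add_of_not_mem hx]
      simp [List.filter_append, PySem.Set.contains_iff, hs]

theorem pvOfList_filter (p : String → Bool) (xs : List String) :
    PySem.Set.ofList (xs.filter p) = (PySem.Set.ofList xs).filter p := by
  induction xs using List.reverseRecOn with
  | nil => rfl
  | append_singleton xs x ih =>
    rw [List.filter_append, PySem.Set.ofList_append_singleton]
    by_cases hp : p x = true
    · rw [List.filter_cons, if_pos hp, List.filter_nil,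
        show x :: ([] : List String) = [x] from rfl]
      rw [PySem.Set.ofList_append_singleton, ih]
      by_cases hm : x ∈ PySem.Set.ofList xs
      · rw [PySem.Set.add_of_mem hm, PySem.Set.add_of_mem]
        simp [List.mem_filter, hm, hp]
      · rw [PySem.Set.add_of_not_mem hm, PySem.Set.add_of_not_mem]
        · rw [List.filter_append]; simp [hp]
        · simp [List.mem_filter, hm]
    · rw [List.filter_cons, if_neg hp, List.filter_nil, List.append_nil, ih]
      by_cases hm : x ∈ PySem.Set.ofList xs
      · rw [PySem.Set.add_of_mem hm]
      · rw [PySem.Set.add_of_not_mem hm, List.filter_append]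
        simp [hp]

theorem pvFilter_singleton (t : String) (c : String → Bool) (l : List String)
    (hnd : l.Nodup) (ht : t ∈ l) :
    l.filter (fun g => (g == t) && c g) = if c t then [t] else [] := by
  induction l with
  | nil => cases ht
  | cons a l ih =>
    rcases List.mem_cons.1 ht with rfl | hmem
    · have hnotin : t ∉ l := (List.nodup_cons.1 hnd).1
      have hz : l.filter (fun g => (g == t) && c g) = [] := by
        rw [List.filter_eq_nil_iff]
        intro g hg
        simp only [Bool.and_eq_true, beq_iff_eq, not_and]
        rintro rfl; exact absurd hg hnotin
      by_cases hc : c t = true <;> simp [List.filter_cons, hc, hz]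
    · have ha : a ≠ t := by rintro rfl; exact (List.nodup_cons.1 hnd).1 hmem
      rw [List.filter_cons, if_neg (by simp [ha])]
      exact ih (List.nodup_cons.1 hnd).2 hmem
-- placeholder to merge: pvKey tried separately

theorem pvSelected_cases (mg : List String) (t : String) :
    (∃ p, pvSelected mg t = mg.filter p) ∨
      (pvSelected mg t = [t] ∧ t ∈ mg) ∨ pvSelected mg t = [] := by
  unfold pvSelected
  cases h : pvPrefixesFor t TRIGGER_STAGE_DEFINITIONS with
  | none =>
    simp only [h, List.isEmpty_nil, Bool.true_and]
    by_cases hm : mg.contains t = true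
    · exact Or.inr (Or.inl ⟨by rw [if_pos hm], List.contains_iff_mem.1 hm⟩)
    · refine Or.inr (Or.inr ?_)
      rw [if_neg (by simpa using hm)]
  | some ps =>
    simp only [h]
    by_cases he : (mg.filter (fun g => ps.any (fun p => PySem.Str.startswith g p))).isEmpty = true
    · by_cases hm : mg.contains t = true
      · exact Or.inr (Or.inl ⟨by rw [he, hm]; rfl, List.contains_iff_mem.1 hm⟩)
      · refine Or.inr (Or.inr ?_)
        rw [if_neg (by simp only [Bool.and_eq_true]; rintro ⟨-, hc⟩; exact hm hc)]
        exact List.isEmpty_iff.1 he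
    · refine Or.inl ⟨fun g => ps.any (fun p => PySem.Str.startswith g p), ?_⟩
      rw [if_neg (by simp only [Bool.and_eq_true]; rintro ⟨hc, -⟩; exact he hc)]

theorem pvKey (mg : List String) (t : String) (s : PySem.Set String) :
    (PySem.Set.ofList (pvSelected mg t)).filter (fun g => !(PySem.Set.contains s g)) =
      ((PySem.Set.ofList mg).filter (fun g => !(PySem.Set.contains s g))).filter
        (fun g => (pvSelected mg t).contains g) := by
  rcases pvSelected_cases mg t with ⟨p, hp⟩ | ⟨h1, hmem⟩ | h0
  · rw [hp, pvOfList_filter, List.filter_filter, List.filter_filter]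
    refine List.filter_congr ?_
    intro g hg
    have hgm : g ∈ mg := (PySem.Set.mem_ofList _ _).1 hg
    by_cases hpg : p g = true <;>
      simp [List.contains_iff_mem, List.mem_filter, hgm, hpg, Bool.and_comm]
  · have hR : List.filter (fun a => ([t].contains a) && !(PySem.Set.contains s a))
        (PySem.Set.ofList mg) = if !(PySem.Set.contains s t) then [t] else [] := by
      rw [List.filter_congr (q := fun g => (g == t) && !(PySem.Set.contains s g))
          (by intro g _; by_cases hgt : g = t <;> simp [hgt])]
      exact pvFilter_singleton t _ _ (PySem.Set.nodup_ofList _)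
        ((PySem.Set.mem_ofList _ _).2 hmem)
    rw [h1, show PySem.Set.ofList [t] = [t] from rfl, List.filter_filter, hR]
    by_cases hs : PySem.Set.contains s t = true <;> simp [List.filter_cons, hs]
  · rw [h0]
    simp

theorem pvAPeel' (mg : List String) (ts : List String) (o : List String)
    (s : PySem.Set String) :
    ((fun st : List String × PySem.Set String =>
        st.1 ++ (PySem.Set.ofList mg).filter (fun g => !(PySem.Set.contains st.2 g)))
      (ts.foldl (fun st t => (pvSelected mg t).foldl pvDStep st) (o, s))) =
    o ++ pvPeel mg ((PySem.Set.ofList mg).filter (fun g => !(PySem.Set.contains s g))) ts := by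
  induction ts generalizing o s with
  | nil => simp [pvPeel]
  | cons t ts ih =>
    rw [List.foldl_cons, pvDFold, ih]
    rw [pvPeel]
    rw [pvKey]
    rw [List.append_assoc]
    have hf : (PySem.Set.ofList mg).filter
          (fun g => !(PySem.Set.contains (PySem.Set.update s (pvSelected mg t)) g)) =
        ((PySem.Set.ofList mg).filter (fun g => !(PySem.Set.contains s g))).filter
          (fun g => !(pvSelected mg t).contains g) := by
      rw [List.filter_filter]
      refine List.filter_congr ?_
      intro g hg
      by_cases h1 : g ∈ s <;> by_cases h2 : g ∈ pvSelected mg t <;>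
        simp [PySem.Set.contains_iff, PySem.Set.mem_update, List.contains_iff_mem, h1, h2]
    rw [hf]

theorem pvA_eq_peel (mg : List String) (ts : List String) :
    ordered_missing_gates mg ts = pvPeel mg (PySem.Set.ofList mg) ts := by
  show (List.foldl pvDStep
      (List.foldl (fun st trigger_gate =>
        List.foldl pvDStep st
          (if ((pvMatchLoopA mg trigger_gate TRIGGER_STAGE_DEFINITIONS).isEmpty &&
              mg.contains trigger_gate) then [trigger_gate]
           else pvMatchLoopA mg trigger_gate TRIGGER_STAGE_DEFINITIONS))
        ([], PySem.Set.empty) ts) mg).1 = pvPeel mg (PySem.Set.ofList mg) ts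
  rw [PySem.List.foldl_congr_mem' ts
    (fun st trigger_gate =>
        List.foldl pvDStep st
          (if ((pvMatchLoopA mg trigger_gate TRIGGER_STAGE_DEFINITIONS).isEmpty &&
              mg.contains trigger_gate) then [trigger_gate]
           else pvMatchLoopA mg trigger_gate TRIGGER_STAGE_DEFINITIONS))
    (fun st t => (pvSelected mg t).foldl pvDStep st)
    ([], PySem.Set.empty)
    (by intro t _ st
        show List.foldl pvDStep st _ = List.foldl pvDStep st (pvSelected mg t)
        rw [pvMatchedA_eq])]
  rw [pvDFold]
  have h := pvAPeel' mg ts [] PySem.Set.empty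
  simp only at h
  rw [h]
  have : (PySem.Set.ofList mg).filter
      (fun g => !(PySem.Set.contains PySem.Set.empty g)) = PySem.Set.ofList mg := by
    simp [PySem.Set.contains_iff, PySem.Set.empty]
  rw [this, List.nil_append]

theorem pvSd (d : PySem.Dict String Int) (k : String) (v : Int) (g : String) :
    (PySem.Dict.setdefault d k v).get? g =
      if d.contains k then d.get? g else (if g = k then some v else d.get? g) := by
  by_cases h : d.contains k = true
  · simp [PySem.Dict.setdefault, h]
  · have hins : PySem.Dict.setdefault d k v = d.insert k v := by
      simp [PySem.Dict.setdefault, PySem.Dict.insert, h]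
    rw [hins, PySem.Dict.get?_insert]
    simp [h]

theorem pvSetdefaultFold (l : List String) (d : PySem.Dict String Int) (i : Int) (g : String) :
    ((l.foldl (fun d g' => PySem.Dict.setdefault d g' i) d).get? g) =
      if (d.get? g).isSome then d.get? g
      else if l.contains g then some i else none := by
  induction l generalizing d with
  | nil =>
    cases h : d.get? g <;> simp [h]
  | cons x l ih =>
    rw [List.foldl_cons, ih, pvSd]
    by_cases hk : d.contains x = true
    · simp only [hk, if_true]
      cases h : d.get? g with
      | some v => simp [h]
      | none =>
        simp only [h, Option.isSome_none, Bool.false_eq_true, if_false]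
        by_cases hgx : g = x
        · subst hgx
          rw [PySem.Dict.contains_eq_isSome_get?, h] at hk
          simp at hk
        · simp [List.contains_cons, hgx, Ne.symm hgx]
    · simp only [hk, Bool.false_eq_true, if_false]
      by_cases hgx : g = x
      · subst hgx
        have hd : d.get? g = none := by
          rw [PySem.Dict.contains_eq_isSome_get?] at hk
          cases h : d.get? g <;> simp [h] at hk ⊢
        simp [hd, List.contains_cons]
      · simp [hgx, List.contains_cons, Ne.symm hgx]

theorem pvEnumFold (mg : List String) (ts : List String) (st : Int)
    (d : PySem.Dict String Int) (g : String) :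
    (((PySem.List.enumerate ts st).foldl
        (fun d it => (pvSelected mg it.2).foldl
          (fun d g' => PySem.Dict.setdefault d g' it.1) d) d).get? g) =
      if (d.get? g).isSome then d.get? g
      else (pvIdx mg g ts).map (fun k => st + (k : Int)) := by
  induction ts generalizing st d with
  | nil =>
    rw [PySem.List.enumerate_nil]
    cases h : d.get? g <;> simp [h, pvIdx]
  | cons t ts ih =>
    rw [PySem.List.enumerate_cons, List.foldl_cons, ih, pvSetdefaultFold]
    cases h : d.get? g with
    | some v => simp [h]
    | none =>
      simp only [h, Option.isSome_none, Bool.false_eq_true, if_false]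
      by_cases hc : (pvSelected mg t).contains g = true
      · have hm := List.contains_iff_mem.1 hc
        simp [pvIdx, hc, hm]
      · simp only [hc, Bool.false_eq_true, if_false, Option.isSome_none, pvIdx]
        cases hi : pvIdx mg g ts <;> simp [hi, hc] <;> push_cast <;> ring

theorem pvPeel_buckets (mg : List String) (ts : List String) (rem : List String) :
    pvPeel mg rem ts =
      ((List.range (ts.length + 1)).map
        (fun k => rem.filter (fun g => (pvIdx mg g ts).getD ts.length == k))).flatten := by
  induction ts generalizing rem with
  | nil =>
    simp [pvPeel, pvIdx, List.range_succ]
  | cons t ts ih =>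
    rw [pvPeel, List.range_succ_eq_map, List.map_cons, List.flatten_cons, List.map_map]
    congr 1
    · refine List.filter_congr ?_
      intro g _
      by_cases hc : (pvSelected mg t).contains g = true
      · have hm : g ∈ pvSelected mg t := List.contains_iff_mem.1 hc
        simp [pvIdx, hc, hm]
      · have hm : g ∉ pvSelected mg t := fun h => hc (List.contains_iff_mem.2 h)
        cases hi : pvIdx mg g ts <;> simp [pvIdx, hc, hm, hi]
    · rw [ih]
      congr 1
      refine List.map_congr_left ?_
      intro k _
      rw [List.filter_filter]
      refine List.filter_congr ?_
      intro g _
      by_cases hc : (pvSelected mg t).contains g = true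
      · have hm : g ∈ pvSelected mg t := List.contains_iff_mem.1 hc
        simp [pvIdx, hc, hm]
      · have hm : g ∉ pvSelected mg t := fun h => hc (List.contains_iff_mem.2 h)
        cases hi : pvIdx mg g ts <;> simp [pvIdx, hc, hm, hi, Function.comp]

theorem pvModifyMapRange (A : Nat → List String) (m j : Nat) (F : List String → List String) :
    (((List.range m).map A).modify j F) =
      (List.range m).map (fun i => if j = i then F (A i) else A i) := by
  apply List.ext_getElem?
  intro i
  rw [List.getElem?_modify]
  by_cases h : i < m
  · simp [List.getElem?_map, List.getElem?_range, h]
  · simp [List.getElem?_map, List.getElem?_range, h]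

theorem pvIdx_lt (mg : List String) (g : String) (ts : List String) (j : Nat)
    (h : pvIdx mg g ts = some j) : j < ts.length := by
  induction ts generalizing j with
  | nil => simp [pvIdx] at h
  | cons t ts ih =>
    rw [pvIdx] at h
    by_cases hc : (pvSelected mg t).contains g = true
    · rw [if_pos hc] at h
      cases h
      simp
    · rw [if_neg hc] at h
      cases hi : pvIdx mg g ts with
      | none => rw [hi] at h; cases h
      | some j' =>
        rw [hi] at h
        cases h
        have := ih j' hi
        simp only [List.length_cons]
        omega

theorem pvBucketFold (l : List String) (f : String → Nat) (m : Nat) (A : Nat → List String)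
    (hf : ∀ g ∈ l, f g < m) :
    l.foldl (fun bs g => bs.modify (f g) (fun b => b ++ [g])) ((List.range m).map A) =
      (List.range m).map (fun i => A i ++ l.filter (fun g => f g == i)) := by
  induction l generalizing A with
  | nil =>
    simp only [List.foldl_nil, List.filter_nil, List.append_nil]
  | cons g l ih =>
    rw [List.foldl_cons, pvModifyMapRange,
      ih (fun i => if f g = i then A i ++ [g] else A i)
        (fun x hx => hf x (List.mem_cons_of_mem _ hx))]
    refine List.map_congr_left ?_
    intro i _
    by_cases h : f g = i
    · simp [h, List.filter_cons, List.append_assoc]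
    · simp [h, List.filter_cons]

theorem pvB_eq_buckets (mg : List String) (ts : List String) :
    ordered_missing_gates_alt mg ts =
      ((List.range (ts.length + 1)).map
        (fun k => (PySem.Set.ofList mg).filter
          (fun g => (pvIdx mg g ts).getD ts.length == k))).flatten := by
  simp only [ordered_missing_gates_alt]
  rw [show (fun (acc : List String) (b : List String) =>
      b.foldl (fun acc g => acc ++ [g]) acc) = (fun acc b => acc ++ b) from
    funext fun acc => funext fun b => PySem.List.foldl_append_singleton_eq_self b acc]
  rw [PySem.List.foldl_append_eq_flatten, List.nil_append]
  have hlen : ((PySem.List.len ts + 1 - 0).toNat) = ts.length + 1 := by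
    rw [PySem.List.len_eq]; omega
  rw [PySem.List.pyRange_one, List.map_map, hlen]
  simp only [Function.comp_def]
  have hP : ∀ g, PySem.Dict.getD
      ((PySem.List.enumerate ts).foldl
        (fun d it => (pvSelected mg it.2).foldl
          (fun d g => PySem.Dict.setdefault d g it.1) d) PySem.Dict.empty)
      g (PySem.List.len ts) =
      (match pvIdx mg g ts with
       | none => PySem.List.len ts
       | some j => (0 : Int) + (j : Int)) := by
    intro g
    rw [PySem.Dict.getD_eq_get?_getD, pvEnumFold, PySem.Dict.get?_empty]
    simp only [Option.isSome_none, Bool.false_eq_true, if_false]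
    cases hi : pvIdx mg g ts <;> simp [hi]
  have hbf := pvBucketFold (PySem.List.dedup mg)
    (fun g => (PySem.Dict.getD
      ((PySem.List.enumerate ts).foldl
        (fun d it => (pvSelected mg it.2).foldl
          (fun d g => PySem.Dict.setdefault d g it.1) d) PySem.Dict.empty)
      g (PySem.List.len ts)).toNat)
    (ts.length + 1) (fun _ => ([] : List String))
    (by intro g _
        simp only
        rw [hP g]
        cases hi : pvIdx mg g ts with
        | none => simp [PySem.List.len_eq]
        | some j =>
          have := pvIdx_lt mg g ts j hi
          simp only [zero_add, Int.toNat_natCast]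
          omega)
  simp only at hbf
  rw [hbf]
  congr 1
  refine List.map_congr_left ?_
  intro k _
  rw [List.nil_append]
  refine List.filter_congr ?_
  intro g _
  rw [hP g]
  cases hi : pvIdx mg g ts with
  | none => simp [PySem.List.len_eq]
  | some j => simp

-- ===== VERDICT (by name: the statement is the Claim_ definition above) =====
theorem ordered_missing_gates_spec : Claim_equal_ordered_missing_gates := by
  intro mg ts _
  unfold Spec_ordered_missing_gates
  rw [pvA_eq_peel, pvB_eq_buckets, pvPeel_buckets]
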